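-- pv_equiv track=rewrite | github.com/Pug2025/FOBE-Scheduling-App | tests/test_assignment_continuity.py | _max_consecutive_days_off
-- ===== SOURCE A (Python) =====
-- def _max_consecutive_days_off(open_days: list[str], worked_days: set[str]) -> int:
--     streak = 0
--     max_streak = 0
--     for day in open_days:
--         if day in worked_days:
--             streak = 0
--             continue
--         streak += 1
--         max_streak = max(max_streak, streak)
--     return max_streak
-- ===== SOURCE B (Python) =====
-- def _max_consecutive_days_off(open_days: list[str], worked_days: set[str]) -> int:
--     # Group the flag sequence into maximal constant runs, then take the
--     # longest run of off-days (default 0 for empty / all-worked input).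
--     flags = [day in worked_days for day in open_days]
--     runs = []
--     i = 0
--     n = len(flags)
--     while i < n:
--         j = i
--         while j < n and flags[j] == flags[i]:
--             j += 1
--         if not flags[i]:
--             runs.append(j - i)
--         i = j
--     return max(runs, default=0)
-- ===== Notes on version B (the rewrite author's own statement) =====
-- stated objective: alternative
-- what changed: Replaces A's inline streak/max accumulator with an explicit grouping pass that splits the flag sequence into maximal constant runs and returns the longest off-day run (default 0).
import Mathlib
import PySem

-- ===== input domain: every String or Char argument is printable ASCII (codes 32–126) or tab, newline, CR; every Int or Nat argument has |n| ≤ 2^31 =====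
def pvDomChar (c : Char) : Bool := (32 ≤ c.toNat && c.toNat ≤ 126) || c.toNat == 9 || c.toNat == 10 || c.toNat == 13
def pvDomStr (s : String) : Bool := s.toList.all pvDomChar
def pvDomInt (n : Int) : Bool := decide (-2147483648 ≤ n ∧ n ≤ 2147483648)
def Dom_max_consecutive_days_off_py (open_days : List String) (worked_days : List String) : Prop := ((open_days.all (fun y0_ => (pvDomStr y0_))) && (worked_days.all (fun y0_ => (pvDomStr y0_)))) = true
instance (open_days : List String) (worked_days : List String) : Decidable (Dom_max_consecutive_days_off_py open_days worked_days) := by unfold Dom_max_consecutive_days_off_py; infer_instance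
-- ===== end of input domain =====

-- B replaces A's inline streak/max accumulator with an explicit grouping pass
-- (maximal constant runs, then the longest off-run, default 0): same cost, different decomposition.

-- ===== PORT A =====
-- literal port of A's streak/max loop
def max_consecutive_days_off_py (open_days : List String) (worked_days : List String) : Int :=
  (open_days.foldl
    (fun (st : Int × Int) day =>
      if PySem.Set.contains worked_days day then (0, st.2)
      else (st.1 + 1, max st.2 (st.1 + 1)))
    (0, 0)).2

-- ===== PORT B =====
-- the off-run lengths of a flag sequence, by maximal constant runs (= Source B's outer while loop)
def pvOffRuns : List Bool → List Int
  | [] => []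
  | b :: rest =>
      let run := (b :: rest).takeWhile (· == b)
      let t := rest.dropWhile (· == b)
      if b then pvOffRuns t else (run.length : Int) :: pvOffRuns t
  termination_by l => l.length
  decreasing_by
    all_goals exact Nat.lt_succ_of_le (List.length_dropWhile_le _ _)

def max_consecutive_days_off_py_alt (open_days : List String) (worked_days : List String) : Int :=
  let flags := open_days.map (fun d => PySem.Set.contains worked_days d)
  (PySem.List.max? (pvOffRuns flags) (fun x => x)).getD 0

-- ===== PRECONDITION & SPEC =====
def Spec_max_consecutive_days_off_py (open_days : List String) (worked_days : List String) (out : Int) : Prop := out = max_consecutive_days_off_py_alt open_days worked_days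
instance (open_days : List String) (worked_days : List String) (out : Int) : Decidable (Spec_max_consecutive_days_off_py open_days worked_days out) := by unfold Spec_max_consecutive_days_off_py; infer_instance

-- ===== CLAIM (what is proved, stated in full; the proofs are below) =====
def Claim_equal_max_consecutive_days_off_py : Prop := ∀ (open_days : List String) (worked_days : List String), Dom_max_consecutive_days_off_py open_days worked_days → Spec_max_consecutive_days_off_py open_days worked_days (max_consecutive_days_off_py open_days worked_days)

-- ===== LEMMAS AND PROOFS =====

-- A's step, phrased over the boolean "worked?" flag
def pvStep (st : Int × Int) (b : Bool) : Int × Int :=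
  if b then (0, st.2) else (st.1 + 1, max st.2 (st.1 + 1))

-- folding A's step over a run of `false` flags
lemma pvFold_false_run (r : List Bool) (hr : ∀ x ∈ r, x = false) :
    ∀ (t : List Bool) (s m : Int), s ≤ m →
      List.foldl pvStep (s, m) (r ++ t)
        = List.foldl pvStep (s + r.length, max m (s + r.length)) t := by
  induction r with
  | nil =>
      intro t s m hsm
      simp [max_eq_left hsm]
  | cons x r ih =>
      intro t s m hsm
      have hx : x = false := hr x (by simp)
      subst hx
      have hmem : ∀ y ∈ r, y = false := fun y hy => hr y (by simp [hy])
      have h1 : (s + 1 : Int) ≤ max m (s + 1) := le_max_right _ _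
      calc List.foldl pvStep (s, m) (false :: r ++ t)
          = List.foldl pvStep (s + 1, max m (s + 1)) (r ++ t) := by
            simp [pvStep]
        _ = List.foldl pvStep (s + 1 + r.length, max (max m (s + 1)) (s + 1 + r.length)) t :=
            ih hmem t _ _ h1
        _ = List.foldl pvStep (s + (r.length + 1 : Nat), max m (s + (r.length + 1 : Nat))) t := by
            congr 1
            simp only [Prod.mk.injEq]
            push_cast
            have e : s + ((r.length : Int) + 1) = s + 1 + (r.length : Int) := by ring
            constructor
            · omega
            · rw [e, max_assoc,
                max_eq_right (by have := Int.natCast_nonneg r.length; omega :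
                  (s + 1 : Int) ≤ s + 1 + (r.length : Int))]

-- dropping a leading run of `true` flags does not change the off-runs
lemma pvOffRuns_dropTrue (t : List Bool) :
    pvOffRuns (t.dropWhile (· == true)) = pvOffRuns t := by
  cases t with
  | nil => rfl
  | cons x t' =>
      cases x with
      | false => simp [List.dropWhile]
      | true => simp [List.dropWhile, pvOffRuns]

lemma pvOffRuns_true_cons (t : List Bool) :
    pvOffRuns (true :: t) = pvOffRuns t := by
  rw [show pvOffRuns (true :: t) = pvOffRuns (t.dropWhile (· == true)) from by
        simp [pvOffRuns]]
  exact pvOffRuns_dropTrue t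

lemma pvFoldlMax (t : List Int) : ∀ x : Int, 0 ≤ x →
    t.foldl max x = max x (t.foldr max 0) := by
  induction t with
  | nil => intro x hx; simpa using (max_eq_left hx).symm
  | cons a t ih =>
      intro x hx
      have := ih (max x a) (le_trans hx (le_max_left _ _))
      simp only [List.foldl, List.foldr, this]
      rw [max_assoc]

lemma pvFoldrMax_nonneg (l : List Int) : 0 ≤ l.foldr max 0 := by
  induction l with
  | nil => simp
  | cons a t ih => exact le_trans ih (le_max_right _ _)

lemma pvOffRuns_nonneg_aux : ∀ (n : Nat) (l : List Bool), l.length ≤ n →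
    ∀ a ∈ pvOffRuns l, 0 ≤ a := by
  intro n
  induction n with
  | zero =>
      intro l hl
      have : l = [] := List.eq_nil_of_length_eq_zero (Nat.le_zero.mp hl)
      subst this
      simp [pvOffRuns]
  | succ n ih =>
      intro l hl a ha
      cases l with
      | nil => simp [pvOffRuns] at ha
      | cons b rest =>
          have hlen : (rest.dropWhile (· == b)).length ≤ n := by
            have := List.length_dropWhile_le (· == b) rest
            simp only [List.length_cons] at hl
            omega
          cases b with
          | true =>
              simp only [pvOffRuns, if_pos] at ha
              exact ih _ hlen a ha
          | false =>
              simp [pvOffRuns] at ha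
              rcases ha with h1 | h2
              · subst h1; positivity
              · have hlen2 : (rest.dropWhile (fun x => !x)).length ≤ n := by
                  have := List.length_dropWhile_le (fun x => !x) rest
                  simp only [List.length_cons] at hl
                  omega
                exact ih _ hlen2 a h2

lemma pvOffRuns_nonneg (l : List Bool) : ∀ a ∈ pvOffRuns l, 0 ≤ a :=
  pvOffRuns_nonneg_aux l.length l (le_refl _)

lemma pvMaxD (l : List Int) (h : ∀ a ∈ l, 0 ≤ a) :
    (PySem.List.max? l (fun x => x)).getD 0 = l.foldr max 0 := by
  cases l with
  | nil => simp [PySem.List.max?]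
  | cons x t =>
      rw [PySem.List.max?_id_cons]
      simpa using pvFoldlMax t x (h x (by simp))

-- the main invariant: A's fold computes the max over B's off-run lengths
lemma pvMain : ∀ (n : Nat) (bl : List Bool), bl.length ≤ n → ∀ m : Int, 0 ≤ m →
    (List.foldl pvStep (0, m) bl).2 = max m ((pvOffRuns bl).foldr max 0) := by
  intro n
  induction n with
  | zero =>
      intro bl hbl m hm
      have : bl = [] := List.eq_nil_of_length_eq_zero (Nat.le_zero.mp hbl)
      subst this
      simp [pvOffRuns, max_eq_left hm]
  | succ n ih =>
      intro bl hbl m hm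
      cases bl with
      | nil => simp [pvOffRuns, max_eq_left hm]
      | cons b t =>
          cases b with
          | true =>
              have h1 : List.foldl pvStep (0, m) (true :: t)
                  = List.foldl pvStep (0, m) t := by simp [pvStep]
              rw [h1, pvOffRuns_true_cons,
                ih t (by simpa using Nat.lt_succ_iff.mp (Nat.lt_of_lt_of_le (by simp) hbl)) m hm]
          | false =>
              -- decompose into the leading false-run and the rest
              have hsplit : false :: t
                  = (false :: t).takeWhile (· == (false : Bool))
                      ++ t.dropWhile (· == (false : Bool)) := by
                have h2 : (false :: t).dropWhile (· == (false : Bool))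
                    = t.dropWhile (· == (false : Bool)) := by simp [List.dropWhile]
                rw [← h2]
                exact (List.takeWhile_append_dropWhile).symm
              have hrfalse : ∀ x ∈ (false :: t).takeWhile (· == (false : Bool)), x = false := by
                intro x hx
                simpa using List.mem_takeWhile_imp hx
              have hruns : pvOffRuns (false :: t)
                  = ((((false :: t).takeWhile (· == (false : Bool))).length : Int))
                      :: pvOffRuns (t.dropWhile (· == (false : Bool))) := by
                simp [pvOffRuns]
              have hk : (0 : Int) ≤ (((false :: t).takeWhile (· == (false : Bool))).length : Int) := by
                positivity
              have hM : (0 : Int) ≤ max m (((false :: t).takeWhile (· == (false : Bool))).length : Int) :=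
                le_trans hm (le_max_left _ _)
              have hfold := pvFold_false_run _ hrfalse (t.dropWhile (· == (false : Bool))) 0 m hm
              simp only [zero_add] at hfold
              rw [hruns]
              conv_lhs => rw [hsplit]
              rw [hfold]
              have hdlen : (t.dropWhile (· == (false : Bool))).length ≤ t.length :=
                List.length_dropWhile_le _ _
              rcases hD : t.dropWhile (· == (false : Bool)) with _ | ⟨x, d'⟩
              · simp [pvOffRuns]
                have hL := Int.natCast_nonneg ((t.takeWhile (fun x => !x)).length)
                omega
              · have hx : x = true := by
                  have hh := List.head?_dropWhile_not (p := (· == (false : Bool))) (l := t)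
                  rw [hD] at hh
                  simpa using hh
                subst hx
                have hd'len : d'.length ≤ n := by
                  rw [hD] at hdlen
                  simp only [List.length_cons] at hdlen hbl
                  omega
                have hstep : List.foldl pvStep
                    ((((false :: t).takeWhile (· == (false : Bool))).length : Int),
                      max m (((false :: t).takeWhile (· == (false : Bool))).length : Int))
                    (true :: d')
                    = List.foldl pvStep
                        (0, max m (((false :: t).takeWhile (· == (false : Bool))).length : Int)) d' := by
                  simp [pvStep]
                rw [hstep, ih d' hd'len _ hM, pvOffRuns_true_cons]
                simp only [List.foldr]
                rw [max_assoc]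

-- ===== VERDICT (by name: the statement is the Claim_ definition above) =====
theorem max_consecutive_days_off_py_spec : Claim_equal_max_consecutive_days_off_py := by
  intro open_days worked_days _
  show max_consecutive_days_off_py open_days worked_days
      = max_consecutive_days_off_py_alt open_days worked_days
  unfold max_consecutive_days_off_py max_consecutive_days_off_py_alt
  rw [show (open_days.foldl
      (fun (st : Int × Int) day =>
        if PySem.Set.contains worked_days day then (0, st.2)
        else (st.1 + 1, max st.2 (st.1 + 1))) (0, 0))
      = List.foldl pvStep (0, 0) (open_days.map (fun d => PySem.Set.contains worked_days d)) from by
        rw [List.foldl_map]; rfl]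
  rw [pvMain _ _ (le_refl _) 0 (le_refl 0),
      pvMaxD _ (pvOffRuns_nonneg _)]
  exact max_eq_right (pvFoldrMax_nonneg _)
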